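-- pv_equiv track=rewrite | github.com/kunkazhao/bilibili-newTools-next | backend/main.py | select_best_jd_image
-- ===== SOURCE A (Python) =====
-- from typing import List, Optional, Dict, Any, Tuple, Set, Literal, Callable, Awaitable
--
-- def select_best_jd_image(images: List[str]) -> Optional[str]:
--
--     if not images:
--
--         return None
--
--     preferred_keywords = ['whiteimage', 'n0', '800x800', '1000x1000']
--
--     for keyword in preferred_keywords:
--
--         for img in images:
--
--             if keyword in img.lower():
--
--                 return img
--
--     return images[0]
-- ===== SOURCE B (Python) =====
-- def select_best_jd_image(images):
--     if not images:
--         return None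
--     keywords = ['whiteimage', 'n0', '800x800', '1000x1000']
--
--     def rank(low):
--         for i, k in enumerate(keywords):
--             if k in low:
--                 return i
--         return len(keywords)
--
--     # single image-major pass: keep the earliest image of minimal priority rank
--     best = images[0]
--     best_rank = rank(best.lower())
--     for img in images[1:]:
--         rk = rank(img.lower())
--         if rk < best_rank:
--             best, best_rank = img, rk
--     return best
-- ===== Notes on version B (the rewrite author's own statement) =====
-- stated objective: alternative
-- what changed: Replaces A's keyword-major nested loops (scan all images once per keyword) with a single image-major pass that assigns each image a priority rank and keeps the earliest image of minimal rank.
import Mathlib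
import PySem

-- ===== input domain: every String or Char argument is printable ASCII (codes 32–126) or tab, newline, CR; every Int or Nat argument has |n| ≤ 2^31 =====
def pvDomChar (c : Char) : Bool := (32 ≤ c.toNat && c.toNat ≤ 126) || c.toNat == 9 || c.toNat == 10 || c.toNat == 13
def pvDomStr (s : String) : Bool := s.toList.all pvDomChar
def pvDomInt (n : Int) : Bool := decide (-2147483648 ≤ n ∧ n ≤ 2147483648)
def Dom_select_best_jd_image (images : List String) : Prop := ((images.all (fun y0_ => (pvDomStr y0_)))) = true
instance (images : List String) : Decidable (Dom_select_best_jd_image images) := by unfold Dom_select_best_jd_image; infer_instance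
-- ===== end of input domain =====

-- B replaces A's keyword-major nested loops by a single image-major pass keeping the
-- earliest image of minimal priority rank (alternative decomposition, same cost).


-- ===== PORT A =====
-- outer 'for keyword in preferred_keywords' loop; the inner 'for img in images' loop
-- with early return is List.find?
def aKeywordLoop (kws : List String) (images : List String) : Option String :=
  match kws with
  | [] => none
  | k :: rest =>
    match images.find? (fun img => PySem.Str.isIn k (PySem.Str.lower img)) with
    | some img => some img
    | none => aKeywordLoop rest images

def select_best_jd_image (images : List String) : Option String :=
  match images with
  | [] => none
  | x :: _ =>
    match aKeywordLoop ["whiteimage", "n0", "800x800", "1000x1000"] images with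
    | some img => some img
    | none => some x      -- return images[0]

-- ===== PORT B =====
-- rank(low): index of the first keyword contained in low, or len(keywords)
def bRank (kws : List String) (low : String) : Nat :=
  match kws with
  | [] => 0
  | k :: rest => if PySem.Str.isIn k low then 0 else bRank rest low + 1

def select_best_jd_image_alt (images : List String) : Option String :=
  match images with
  | [] => none
  | x :: xs =>
    let kws := ["whiteimage", "n0", "800x800", "1000x1000"]
    let res := xs.foldl
      (fun (b : String × Nat) img =>
        let rk := bRank kws (PySem.Str.lower img)
        if rk < b.2 then (img, rk) else b)
      (x, bRank kws (PySem.Str.lower x))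
    some res.1

-- ===== PRECONDITION & SPEC =====
def Spec_select_best_jd_image (images : List String) (out : Option String) : Prop := out = select_best_jd_image_alt images
instance (images : List String) (out : Option String) : Decidable (Spec_select_best_jd_image images out) := by unfold Spec_select_best_jd_image; infer_instance

-- ===== CLAIM (what is proved, stated in full; the proofs are below) =====
def Claim_equal_select_best_jd_image : Prop := ∀ (images : List String), Dom_select_best_jd_image images → Spec_select_best_jd_image images (select_best_jd_image images)

-- ===== LEMMAS AND PROOFS =====

-- rank of an image
def pvR (kws : List String) (img : String) : Nat := bRank kws (PySem.Str.lower img)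

-- minimal rank over a list (kws.length if the list is empty; rank never exceeds kws.length)
def pvMinR (kws : List String) (l : List String) : Nat :=
  l.foldr (fun e m => min (pvR kws e) m) kws.length

theorem pvMinR_nil (kws : List String) : pvMinR kws [] = kws.length := rfl

theorem pvMinR_cons (kws : List String) (x : String) (l : List String) :
    pvMinR kws (x :: l) = min (pvR kws x) (pvMinR kws l) := rfl

theorem bRank_le (kws : List String) (low : String) : bRank kws low ≤ kws.length := by
  induction kws with
  | nil => simp [bRank]
  | cons k rest ih =>
    simp only [bRank, List.length_cons]
    split
    · omega
    · omega

theorem pvMinR_le_of_mem (kws : List String) {l : List String} {e : String} (he : e ∈ l) :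
    pvMinR kws l ≤ pvR kws e := by
  induction l with
  | nil => cases he
  | cons a as ih =>
    rw [pvMinR_cons]
    rcases List.mem_cons.1 he with rfl | he'
    · exact Nat.min_le_left _ _
    · exact le_trans (Nat.min_le_right _ _) (ih he')

theorem find?_congr_mem {α : Type} {p q : α → Bool} :
    ∀ {l : List α}, (∀ a ∈ l, p a = q a) → l.find? p = l.find? q := by
  intro l
  induction l with
  | nil => intro _; rfl
  | cons a as ih =>
    intro h
    simp only [List.find?]
    rw [h a (List.mem_cons_self ..)]
    cases q a
    · exact ih (fun b hb => h b (List.mem_cons_of_mem _ hb))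
    · rfl

-- B's fold returns the first element of x::xs of minimal rank
theorem fold_eq_find? (kws : List String) :
    ∀ (xs : List String) (x : String),
      (x :: xs).find? (fun e => pvR kws e == pvMinR kws (x :: xs)) =
        some ((xs.foldl
          (fun (b : String × Nat) img =>
            let rk := bRank kws (PySem.Str.lower img)
            if rk < b.2 then (img, rk) else b)
          (x, bRank kws (PySem.Str.lower x))).1) := by
  intro xs
  induction xs with
  | nil =>
    intro x
    simp only [List.find?, List.foldl, pvMinR_cons, pvMinR_nil, pvR,
      Nat.min_eq_left (bRank_le kws _), beq_self_eq_true]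
  | cons y ys ih =>
    intro x
    have hfold : ((y :: ys).foldl
        (fun (b : String × Nat) img =>
          let rk := bRank kws (PySem.Str.lower img)
          if rk < b.2 then (img, rk) else b)
        (x, bRank kws (PySem.Str.lower x)))
      = (ys.foldl
        (fun (b : String × Nat) img =>
          let rk := bRank kws (PySem.Str.lower img)
          if rk < b.2 then (img, rk) else b)
        (if bRank kws (PySem.Str.lower y) < bRank kws (PySem.Str.lower x)
          then (y, bRank kws (PySem.Str.lower y))
          else (x, bRank kws (PySem.Str.lower x)))) := by
      simp only [List.foldl]
    by_cases hlt : bRank kws (PySem.Str.lower y) < bRank kws (PySem.Str.lower x)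
    · -- y strictly better: the state becomes (y, r y)
      rw [hfold, if_pos hlt, ← ih y]
      have hmin : pvMinR kws (x :: y :: ys) = pvMinR kws (y :: ys) := by
        simp only [pvMinR_cons, pvR]
        omega
      rw [hmin]
      have hx : (pvR kws x == pvMinR kws (y :: ys)) = false := by
        have h1 : pvMinR kws (y :: ys) ≤ pvR kws y := by
          rw [pvMinR_cons]; exact Nat.min_le_left _ _
        simp only [beq_eq_false_iff_ne, ne_eq, pvR] at *
        omega
      simp only [List.find?, hx]
    · -- x stays: the state keeps (x, r x)
      rw [hfold, if_neg hlt, ← ih x]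
      have hle : pvR kws x ≤ pvR kws y := by
        simp only [pvR]; omega
      have hmin : pvMinR kws (x :: y :: ys) = pvMinR kws (x :: ys) := by
        simp only [pvMinR_cons, pvR] at hle ⊢
        omega
      rw [hmin]
      by_cases hx : pvR kws x = pvMinR kws (x :: ys)
      · have hxb : (pvR kws x == pvMinR kws (x :: ys)) = true := by
          simp only [beq_iff_eq]; exact hx
        simp only [List.find?, hxb]
      · have hminle : pvMinR kws (x :: ys) ≤ pvR kws x := by
          rw [pvMinR_cons]; exact Nat.min_le_left _ _
        have hxb : (pvR kws x == pvMinR kws (x :: ys)) = false := by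
          simp only [beq_eq_false_iff_ne, ne_eq]; exact hx
        have hyb : (pvR kws y == pvMinR kws (x :: ys)) = false := by
          simp only [beq_eq_false_iff_ne, ne_eq]
          omega
        simp only [List.find?, hxb, hyb]

theorem bRank_eq_zero_iff (k : String) (ks : List String) (low : String) :
    bRank (k :: ks) low = 0 ↔ PySem.Str.isIn k low = true := by
  simp only [bRank]
  split <;> simp_all

-- A's keyword loop (with images[0] fallback) also returns the first element of minimal rank
theorem aLoop_eq_find? :
    ∀ (kws : List String) (x : String) (xs : List String),
      (x :: xs).find? (fun e => pvR kws e == pvMinR kws (x :: xs)) =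
        some ((aKeywordLoop kws (x :: xs)).getD x) := by
  intro kws
  induction kws with
  | nil =>
    intro x xs
    have hmin : ∀ l : List String, pvMinR [] l = 0 := by
      intro l
      induction l with
      | nil => rfl
      | cons a as ihl => rw [pvMinR_cons, ihl]; rfl
    simp only [List.find?, aKeywordLoop, hmin, Option.getD]
    rfl
  | cons k ks ih =>
    intro x xs
    cases hf : (x :: xs).find? (fun img => PySem.Str.isIn k (PySem.Str.lower img)) with
    | some i =>
      -- some image matches keyword k: minimal rank is 0 and the first rank-0 image
      -- is exactly the first image containing k
      have hmem : i ∈ (x :: xs) := List.mem_of_find?_eq_some hf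
      have hpi' := List.find?_some hf
      have hpi : PySem.Str.isIn k (PySem.Str.lower i) = true := hpi'
      have hri : pvR (k :: ks) i = 0 :=
        (bRank_eq_zero_iff k ks (PySem.Str.lower i)).2 hpi
      have hmin0 : pvMinR (k :: ks) (x :: xs) = 0 := by
        have := pvMinR_le_of_mem (k :: ks) hmem
        omega
      have hcong : ∀ a ∈ (x :: xs),
          (pvR (k :: ks) a == pvMinR (k :: ks) (x :: xs)) =
            PySem.Str.isIn k (PySem.Str.lower a) := by
        intro a _
        rw [hmin0]
        by_cases h : PySem.Str.isIn k (PySem.Str.lower a) = true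
        · have h0 : pvR (k :: ks) a = 0 :=
            (bRank_eq_zero_iff k ks (PySem.Str.lower a)).2 h
          rw [h0, h]
          rfl
        · have hne : pvR (k :: ks) a ≠ 0 := fun h0 =>
            h ((bRank_eq_zero_iff k ks (PySem.Str.lower a)).1 h0)
          rw [Bool.not_eq_true] at h
          rw [h]
          simp only [beq_eq_false_iff_ne, ne_eq]
          exact hne
      rw [find?_congr_mem hcong, hf]
      simp only [aKeywordLoop]
      rw [hf]
      rfl
    | none =>
      -- no image matches k: every rank is one more than the rank w.r.t. ks
      have hnone : ∀ a ∈ (x :: xs), PySem.Str.isIn k (PySem.Str.lower a) = false := by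
        intro a ha
        exact Bool.eq_false_iff.mpr (List.find?_eq_none.1 hf a ha)
      have hmin : ∀ (l : List String), (∀ a ∈ l, PySem.Str.isIn k (PySem.Str.lower a) = false) →
          pvMinR (k :: ks) l = pvMinR ks l + 1 := by
        intro l
        induction l with
        | nil => intro _; simp only [pvMinR_nil, List.length_cons]
        | cons a as ihl =>
          intro h
          rw [pvMinR_cons, pvMinR_cons, ihl (fun b hb => h b (List.mem_cons_of_mem _ hb))]
          have ha : pvR (k :: ks) a = pvR ks a + 1 := by
            simp only [pvR, bRank, h a (List.mem_cons_self ..), Bool.false_eq_true, if_false]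
          omega
      have hcong : ∀ a ∈ (x :: xs),
          (pvR (k :: ks) a == pvMinR (k :: ks) (x :: xs)) =
            (pvR ks a == pvMinR ks (x :: xs)) := by
        intro a ha
        have hra : pvR (k :: ks) a = pvR ks a + 1 := by
          simp only [pvR, bRank, hnone a ha, Bool.false_eq_true, if_false]
        rw [hra, hmin _ hnone]
        by_cases h : pvR ks a = pvMinR ks (x :: xs)
        · rw [h]
          simp only [beq_self_eq_true]
        · have h1 : (pvR ks a + 1 == pvMinR ks (x :: xs) + 1) = false := by
            simp only [beq_eq_false_iff_ne, ne_eq]; omega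
          have h2 : (pvR ks a == pvMinR ks (x :: xs)) = false := by
            simp only [beq_eq_false_iff_ne, ne_eq]; exact h
          rw [h1, h2]
      rw [find?_congr_mem hcong, ih x xs]
      simp only [aKeywordLoop]
      rw [hf]

-- ===== VERDICT (by name: the statement is the Claim_ definition above) =====
theorem select_best_jd_image_spec : Claim_equal_select_best_jd_image := by
  unfold Claim_equal_select_best_jd_image
  intro images _
  unfold Spec_select_best_jd_image
  cases images with
  | nil => rfl
  | cons x xs =>
    have hA := aLoop_eq_find? ["whiteimage", "n0", "800x800", "1000x1000"] x xs
    have hB := fold_eq_find? ["whiteimage", "n0", "800x800", "1000x1000"] xs x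
    have h : (aKeywordLoop ["whiteimage", "n0", "800x800", "1000x1000"] (x :: xs)).getD x
        = (xs.foldl
            (fun (b : String × Nat) img =>
              let rk := bRank ["whiteimage", "n0", "800x800", "1000x1000"] (PySem.Str.lower img)
              if rk < b.2 then (img, rk) else b)
            (x, bRank ["whiteimage", "n0", "800x800", "1000x1000"] (PySem.Str.lower x))).1 :=
      Option.some_inj.mp (hA ▸ hB ▸ rfl)
    calc select_best_jd_image (x :: xs)
        = some ((aKeywordLoop ["whiteimage", "n0", "800x800", "1000x1000"] (x :: xs)).getD x) := by
          cases hh : aKeywordLoop ["whiteimage", "n0", "800x800", "1000x1000"] (x :: xs) with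
          | none => simp only [select_best_jd_image, hh, Option.getD]
          | some i => simp only [select_best_jd_image, hh, Option.getD]
      _ = select_best_jd_image_alt (x :: xs) := by rw [h]; rfl
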